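-- pv_equiv track=rewrite | github.com/noegomviv/Ejercicios-Python-noeliagv | ejercicio5.py | generarPares
-- ===== SOURCE A (Python) =====
-- def esPar(numero) :
--     resto = (numero % 2)
--     if resto == 0:
--         return True # --> Implemente código de la función <--
--     else:
--         return False
--
-- def generarPares(valores, inicio) :
--     pares=[]
--     numero=inicio
--     contador=valores
--     while contador > 0 :
--         if esPar(numero) :
--             pares.append(numero)
--             numero=numero+2
--             contador=contador-1
--         else :
--             numero=numero+1
--     # --> Complete código de la función <--
--
--     return pares
-- ===== SOURCE B (Python) =====
-- def generarPares(valores, inicio):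
--     start = inicio if inicio % 2 == 0 else inicio + 1
--     return [start + 2*i for i in range(valores)]
-- ===== Notes on version B (the rewrite author's own statement) =====
-- stated objective: simpler
-- what changed: Replaces A's while-loop with a per-element parity test and step-by-1 retry by computing the even starting point once and emitting the list in closed form [start + 2*i for i in range(valores)].
import Mathlib
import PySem

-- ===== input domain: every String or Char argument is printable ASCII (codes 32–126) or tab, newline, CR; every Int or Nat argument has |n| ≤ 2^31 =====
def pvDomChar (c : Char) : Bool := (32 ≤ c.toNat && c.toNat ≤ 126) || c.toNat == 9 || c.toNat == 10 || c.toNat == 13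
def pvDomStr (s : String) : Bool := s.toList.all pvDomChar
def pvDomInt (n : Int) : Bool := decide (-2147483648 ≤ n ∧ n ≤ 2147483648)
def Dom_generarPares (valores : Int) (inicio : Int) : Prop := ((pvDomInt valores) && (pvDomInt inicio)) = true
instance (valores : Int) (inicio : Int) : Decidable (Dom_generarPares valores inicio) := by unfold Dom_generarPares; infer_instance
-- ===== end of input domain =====

-- B computes the even starting point once and emits the list in closed form,
-- removing A's per-element parity branch and step-by-1 retry (objective: simpler).

-- ===== PORT A =====
def esPar (numero : Int) : Bool :=
  let resto := PySem.Int.mod numero 2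
  if resto = 0 then true else false

theorem esPar_iff (n : Int) : esPar n = true ↔ n % 2 = 0 := by
  rw [esPar]
  simp only [PySem.Int.mod_eq_emod_of_pos (a := n) (by norm_num : (0:Int) < 2)]
  split <;> simp_all

theorem esPar_add_two (n : Int) : esPar (n + 2) = esPar n := by
  by_cases h : esPar n = true
  · have := (esPar_iff n).mp h
    simp [esPar_iff, *]
  · simp only [Bool.not_eq_true] at h
    have : ¬ n % 2 = 0 := fun hc => by simp [(esPar_iff n).mpr hc] at h
    simp only [h, Bool.eq_false_iff, ne_eq, esPar_iff]
    omega

theorem esPar_succ (n : Int) (h : esPar n = false) : esPar (n + 1) = true := by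
  have : ¬ n % 2 = 0 := fun hc => by simp [(esPar_iff n).mpr hc] at h
  rw [esPar_iff]; omega

def generarParesLoop (pares : List Int) (numero : Int) (contador : Int) : List Int :=
  if h : contador > 0 then
    if hp : esPar numero then
      generarParesLoop (pares ++ [numero]) (numero + 2) (contador - 1)
    else
      generarParesLoop pares (numero + 1) contador
  else pares
termination_by 2 * contador.toNat + (if esPar numero then 0 else 1)
decreasing_by
  · simp [esPar_add_two, hp]
    omega
  · simp only [Bool.not_eq_true] at hp
    simp [esPar_succ numero hp, hp]

def generarPares (valores : Int) (inicio : Int) : List Int :=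
  generarParesLoop [] inicio valores

-- ===== PORT B =====
def generarPares_alt (valores : Int) (inicio : Int) : List Int :=
  let start : Int := if PySem.Int.mod inicio 2 = 0 then inicio else inicio + 1
  (PySem.List.pyRange 0 valores 1).map (fun i => start + 2 * i)

-- ===== PRECONDITION & SPEC =====
def Spec_generarPares (valores : Int) (inicio : Int) (out : List Int) : Prop := out = generarPares_alt valores inicio
instance (valores : Int) (inicio : Int) (out : List Int) : Decidable (Spec_generarPares valores inicio out) := by unfold Spec_generarPares; infer_instance

-- ===== CLAIM (what is proved, stated in full; the proofs are below) =====
def Claim_equal_generarPares : Prop := ∀ (valores : Int) (inicio : Int), Dom_generarPares valores inicio → Spec_generarPares valores inicio (generarPares valores inicio)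

-- ===== LEMMAS AND PROOFS =====

theorem pyRange_map_shift (c : Int) (x : Int) (h : 0 < c) :
    (PySem.List.pyRange 0 c 1).map (fun i => x + 2 * i) =
      x :: (PySem.List.pyRange 0 (c - 1) 1).map (fun i => (x + 2) + 2 * i) := by
  apply List.ext_getElem
  · simp [PySem.List.length_pyRange_one]
    omega
  · intro i h1 h2
    simp only [List.length_map, PySem.List.length_pyRange_one] at h1
    rcases i with _ | j
    · simp [PySem.List.getElem_pyRange_one]
    · simp only [List.getElem_cons_succ, List.getElem_map, PySem.List.getElem_pyRange_one]
      push_cast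
      ring

theorem generarParesLoop_even (c : Nat) :
    ∀ (contador : Int), contador.toNat = c → ∀ (pares : List Int) (numero : Int), esPar numero = true →
      generarParesLoop pares numero contador =
        pares ++ (PySem.List.pyRange 0 contador 1).map (fun i => numero + 2 * i) := by
  induction c with
  | zero =>
    intro contador hc pares numero hp
    have hle : ¬ contador > 0 := by omega
    rw [generarParesLoop]
    simp [hle, PySem.List.pyRange_one_eq_nil (by omega : contador ≤ 0)]
  | succ n ih =>
    intro contador hc pares numero hp
    have hgt : contador > 0 := by omega
    rw [generarParesLoop]
    simp only [hgt, dif_pos, hp, dif_pos]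
    have hp2 : esPar (numero + 2) = true := by rw [esPar_add_two]; exact hp
    have hc' : (contador - 1).toNat = n := by omega
    rw [ih (contador - 1) hc' (pares ++ [numero]) (numero + 2) hp2]
    rw [pyRange_map_shift contador numero hgt]
    simp

theorem mod_two_zero_iff (n : Int) : PySem.Int.mod n 2 = 0 ↔ n % 2 = 0 := by
  rw [PySem.Int.mod_eq_emod_of_pos (by norm_num : (0:Int) < 2)]

-- ===== VERDICT (by name: the statement is the Claim_ definition above) =====
theorem generarPares_spec : Claim_equal_generarPares := by
  intro valores inicio _
  unfold Spec_generarPares generarPares generarPares_alt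
  by_cases hp : esPar inicio = true
  · rw [generarParesLoop_even valores.toNat valores rfl [] inicio hp]
    have hm : PySem.Int.mod inicio 2 = 0 := (mod_two_zero_iff inicio).mpr ((esPar_iff inicio).mp hp)
    simp only [hm, if_pos, List.nil_append]
  · simp only [Bool.not_eq_true] at hp
    have hm : ¬ PySem.Int.mod inicio 2 = 0 := fun hc => by
      have := (esPar_iff inicio).mpr ((mod_two_zero_iff inicio).mp hc)
      simp [this] at hp
    by_cases hv : valores > 0
    · rw [generarParesLoop]
      simp only [hv, dif_pos, hp, Bool.false_eq_true, dif_neg, not_false_eq_true]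
      rw [generarParesLoop_even valores.toNat valores rfl [] (inicio + 1) (esPar_succ inicio hp)]
      simp only [hm, if_neg, List.nil_append, not_false_eq_true]
    · rw [generarParesLoop]
      simp [hv, PySem.List.pyRange_one_eq_nil (by omega : valores ≤ 0)]
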